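-- pv_equiv track=rewrite | github.com/VaHiX/CodeForces | Python/ByRound/1805/1805_F1_Survival_of_the_Weakest_easy_version.py | MSB
-- ===== SOURCE A (Python) =====
-- def MSB(num):
--     """Returns Most Significant Bit of a number (Leftmost bit) in O(logN)"""
--     if num <= 0:
--         return 0
--     ans = 1
--     num >>= 1
--     while num:
--         num >>= 1
--         ans <<= 1
--     return ans
-- ===== SOURCE B (Python) =====
-- def MSB(num):
--     """Returns Most Significant Bit of a number (Leftmost bit)"""
--     if num <= 0:
--         return 0
--     return 1 << (num.bit_length() - 1)
-- ===== Notes on version B (the rewrite author's own statement) =====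
-- stated objective: idiomatic
-- what changed: Replaced A's iterative shift loop by a single closed-form expression isolating the highest set bit via int.bit_length().
import Mathlib
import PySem

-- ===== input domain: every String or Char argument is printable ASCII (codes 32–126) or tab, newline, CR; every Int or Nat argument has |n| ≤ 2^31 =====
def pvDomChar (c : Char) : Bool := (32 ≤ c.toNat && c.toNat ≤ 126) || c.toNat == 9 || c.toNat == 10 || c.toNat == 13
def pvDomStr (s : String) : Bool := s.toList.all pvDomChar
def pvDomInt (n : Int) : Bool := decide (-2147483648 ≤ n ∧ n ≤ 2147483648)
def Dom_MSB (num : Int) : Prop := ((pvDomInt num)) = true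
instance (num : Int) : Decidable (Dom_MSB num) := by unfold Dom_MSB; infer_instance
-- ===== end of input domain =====

-- B replaces A's iterative halving/doubling loop with the closed form 1 << (bit_length - 1); objective: idiomatic.

-- ===== PORT A =====
-- the while loop of A: while num: num >>= 1; ans <<= 1
def MSB.loop : Nat → Int → Int
  | 0, ans => ans
  | Nat.succ n, ans => MSB.loop ((Nat.succ n) >>> 1) (ans <<< (1 : Nat))
decreasing_by simpa [Nat.shiftRight_succ] using Nat.div_lt_self (Nat.succ_pos n) (by decide)

def MSB (num : Int) : Int :=
  if num ≤ 0 then 0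
  else MSB.loop (num.toNat >>> 1) 1

-- ===== PORT B =====
-- num.bit_length() for num > 0 is Nat.size
def MSB_alt (num : Int) : Int :=
  if num ≤ 0 then 0
  else (1 : Int) <<< (Nat.size num.toNat - 1)

-- ===== PRECONDITION & SPEC =====
def Spec_MSB (num : Int) (out : Int) : Prop := out = MSB_alt num
instance (num : Int) (out : Int) : Decidable (Spec_MSB num out) := by unfold Spec_MSB; infer_instance

-- ===== CLAIM (what is proved, stated in full; the proofs are below) =====
def Claim_equal_MSB : Prop := ∀ (num : Int), Dom_MSB num → Spec_MSB num (MSB num)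

-- ===== LEMMAS AND PROOFS =====

theorem size_div_two {n : Nat} (h : n ≠ 0) : Nat.size n = Nat.size (n / 2) + 1 := by
  apply le_antisymm
  · rw [Nat.size_le, pow_succ]
    have h1 := Nat.lt_size_self (n / 2)
    omega
  · by_cases h2 : n / 2 = 0
    · have : n = 1 := by omega
      subst this
      simp [Nat.size_one]
    · have hs : 0 < Nat.size (n / 2) := Nat.size_pos.mpr (Nat.pos_of_ne_zero h2)
      have h3 : 2 ^ (Nat.size (n / 2) - 1) ≤ n / 2 :=
        Nat.lt_size.mp (by omega)
      have h4 : 2 ^ Nat.size (n / 2) = 2 * 2 ^ (Nat.size (n / 2) - 1) := by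
        rw [← pow_succ']
        congr 1
        omega
      have : Nat.size (n / 2) < Nat.size n := Nat.lt_size.mpr (by omega)
      omega

theorem loop_eq (n : Nat) (ans : Int) : MSB.loop n ans = ans <<< Nat.size n := by
  induction n using Nat.strong_induction_on generalizing ans with
  | _ n ih =>
    match n with
    | 0 => simp [MSB.loop, Nat.size_zero, Int.shiftLeft_eq]
    | Nat.succ m =>
      rw [MSB.loop]
      rw [ih ((Nat.succ m) >>> 1) (by
        simpa [Nat.shiftRight_succ] using Nat.div_lt_self (Nat.succ_pos m) (by decide))]
      rw [size_div_two (Nat.succ_ne_zero m), Nat.shiftRight_one]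
      rw [Int.shiftLeft_eq, Int.shiftLeft_eq, Int.shiftLeft_eq, pow_succ]
      ring

-- ===== VERDICT (by name: the statement is the Claim_ definition above) =====
theorem MSB_spec : Claim_equal_MSB := by
  intro num _
  unfold Spec_MSB MSB MSB_alt
  by_cases h : num ≤ 0
  · simp [h]
  · simp only [h, if_false]
    rw [loop_eq]
    have hn : num.toNat ≠ 0 := by omega
    rw [Nat.shiftRight_one]
    have hsz := size_div_two hn
    congr 1
    omega
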